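-- pv_equiv track=rewrite | github.com/valuemapglobal/DocMirror | docmirror/core/table/table_structure_fix.py | trim_trailing_empty_columns
-- ===== SOURCE A (Python) =====
-- from typing import List, Optional
--
-- def trim_trailing_empty_columns(table: List[List[str]]) -> List[List[str]]:
--     """Crop全为空的尾部列。
--
--     泛化: 只裁尾部, 不影响中间的Empty column。
--     """
--     if not table or not table[0]:
--         return table
--
--     col_count = max(len(row) for row in table)
--     trim_to = col_count
--     for ci in range(col_count - 1, -1, -1):
--         all_empty = all(
--             not (row[ci] if ci < len(row) else "").strip()
--             for row in table
--         )
--         if all_empty: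
--             trim_to = ci
--         else:
--             break
--
--     if trim_to < col_count:
--         table = [row[:trim_to] for row in table]
--     return table
-- ===== SOURCE B (Python) =====
-- from typing import List
--
--
-- def trim_trailing_empty_columns(table: List[List[str]]) -> List[List[str]]:
--     """Single row-major pass: trim_to = max over rows of (last non-empty cell index + 1)."""
--     if not table or not table[0]:
--         return table
--     col_count = 0
--     trim_to = 0
--     for row in table:
--         if len(row) > col_count:
--             col_count = len(row)
--         last = 0
--         for j, cell in enumerate(row):
--             if cell.strip():
--                 last = j + 1
--         if last > trim_to:
--             trim_to = last
--     if trim_to < col_count: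
--         return [row[:trim_to] for row in table]
--     return table
-- ===== Notes on version B (the rewrite author's own statement) =====
-- stated objective: alternative
-- what changed: Replaced the column-major right-to-left scan (each candidate column re-scans every row, with break) by a single row-major pass that tracks, per row, the position past its last non-empty cell and takes the maximum over rows as the trim point.
import Mathlib
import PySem

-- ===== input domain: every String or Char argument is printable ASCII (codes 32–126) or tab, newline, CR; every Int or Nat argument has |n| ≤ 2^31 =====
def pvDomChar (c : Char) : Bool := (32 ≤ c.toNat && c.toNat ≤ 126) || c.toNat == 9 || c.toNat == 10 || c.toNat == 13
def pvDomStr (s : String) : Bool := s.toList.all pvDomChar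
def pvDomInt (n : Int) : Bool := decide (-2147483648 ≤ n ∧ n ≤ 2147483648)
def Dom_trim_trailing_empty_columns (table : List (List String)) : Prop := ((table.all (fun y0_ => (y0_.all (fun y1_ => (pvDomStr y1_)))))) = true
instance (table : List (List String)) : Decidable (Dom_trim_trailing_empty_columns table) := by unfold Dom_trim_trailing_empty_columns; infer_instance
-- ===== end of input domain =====

-- B changes the decomposition (row-major single pass instead of column-major scan with break); no speed claim.

-- ===== PORT A =====
-- `not s.strip()`: the stripped cell is empty (shared by both ports, both Pythons write `cell.strip()`)
def pvCellEmpty (s : String) : Bool := (PySem.Str.strip s).toList.isEmpty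

-- the `for ci in range(col_count-1,-1,-1)` loop with its break, as structural recursion
def pvTrimLoopA (table : List (List String)) : List Int → Int → Int
  | [], trim_to => trim_to
  | ci :: rest, trim_to =>
    if table.all (fun row => pvCellEmpty (PySem.List.pyGetD row ci "")) then
      pvTrimLoopA table rest ci
    else trim_to

def trim_trailing_empty_columns (table : List (List String)) : List (List String) :=
  if table = [] ∨ table.head? = some [] then table
  else
    let col_count : Int :=
      (PySem.List.max? (table.map (fun row => (row.length : Int))) (fun x => x)).getD 0
    let trim_to := pvTrimLoopA table (PySem.List.pyRange (col_count - 1) (-1) (-1)) col_count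
    if trim_to < col_count then
      table.map (fun row => PySem.List.slice row none (some trim_to))
    else table

-- ===== PORT B =====
-- inner `for j, cell in enumerate(row)` loop tracking `last`
def pvLastB (row : List String) : Int :=
  (PySem.List.enumerate row).foldl
    (fun last jc => if !(pvCellEmpty jc.2) then jc.1 + 1 else last) 0

def trim_trailing_empty_columns_alt (table : List (List String)) : List (List String) :=
  if table = [] ∨ table.head? = some [] then table
  else
    let st := table.foldl
      (fun (st : Int × Int) row =>
        let cc := if (row.length : Int) > st.1 then (row.length : Int) else st.1
        let last := pvLastB row
        (cc, if last > st.2 then last else st.2))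
      (0, 0)
    if st.2 < st.1 then
      table.map (fun row => PySem.List.slice row none (some st.2))
    else table

-- ===== PRECONDITION & SPEC =====
def Spec_trim_trailing_empty_columns (table : List (List String)) (out : List (List String)) : Prop := out = trim_trailing_empty_columns_alt table
instance (table : List (List String)) (out : List (List String)) : Decidable (Spec_trim_trailing_empty_columns table out) := by unfold Spec_trim_trailing_empty_columns; infer_instance

-- ===== CLAIM (what is proved, stated in full; the proofs are below) =====
def Claim_equal_trim_trailing_empty_columns : Prop := ∀ (table : List (List String)), Dom_trim_trailing_empty_columns table → Spec_trim_trailing_empty_columns table (trim_trailing_empty_columns table)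

-- ===== LEMMAS AND PROOFS =====

-- position just past the last non-empty cell of a row (the common spec of both passes)
def pvRowLast : List String → Nat
  | [] => 0
  | c :: t => if pvRowLast t = 0 then (if pvCellEmpty c then 0 else 1) else pvRowLast t + 1

-- max row length / max pvRowLast over the table
def pvCC (table : List (List String)) : Nat := table.foldr (fun r a => max r.length a) 0
def pvM (table : List (List String)) : Nat := table.foldr (fun r a => max (pvRowLast r) a) 0

theorem pvRowLast_le_length (row : List String) : pvRowLast row ≤ row.length := by
  induction row with
  | nil => simp [pvRowLast]
  | cons c t ih => simp only [pvRowLast, List.length_cons]; split_ifs <;> omega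

theorem pvCell_empty_of_le (row : List String) (j : Nat) (h : pvRowLast row ≤ j) :
    pvCellEmpty (row.getD j "") = true := by
  induction row generalizing j with
  | nil => rw [List.getD_nil]; decide
  | cons c t ih =>
    cases j with
    | zero =>
      simp only [pvRowLast] at h
      split_ifs at h with h1 h2
      · simpa using h2
      · omega
      · omega
    | succ j =>
      have : pvRowLast t ≤ j := by
        simp only [pvRowLast] at h; split_ifs at h <;> omega
      simpa using ih j this

theorem pvCell_nonempty_at (row : List String) (k : Nat) (h : pvRowLast row = k + 1) :
    pvCellEmpty (row.getD k "") = false := by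
  induction row generalizing k with
  | nil => simp [pvRowLast] at h
  | cons c t ih =>
    simp only [pvRowLast] at h
    by_cases h1 : pvRowLast t = 0
    · rw [if_pos h1] at h
      by_cases h2 : pvCellEmpty c
      · rw [if_pos h2] at h; omega
      · have hk : k = 0 := by rw [if_neg h2] at h; omega
        subst hk; simpa using h2
    · rw [if_neg h1] at h
      cases k with
      | zero => omega
      | succ k' => simpa using ih k' (by omega)

theorem pvM_bound (table : List (List String)) : ∀ r ∈ table, pvRowLast r ≤ pvM table := by
  induction table with
  | nil => simp
  | cons r t ih =>
    intro s hs
    have hfold : pvM (r :: t) = max (pvRowLast r) (pvM t) := rfl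
    rcases List.mem_cons.mp hs with h | h
    · subst h; rw [hfold]; omega
    · have h2 := ih s h; rw [hfold]; omega

theorem pvM_attained (table : List (List String)) :
    pvM table = 0 ∨ ∃ r ∈ table, pvRowLast r = pvM table := by
  induction table with
  | nil => left; rfl
  | cons r t ih =>
    have hfold : pvM (r :: t) = max (pvRowLast r) (pvM t) := rfl
    by_cases h : pvM t ≤ pvRowLast r
    · right; exact ⟨r, List.mem_cons_self, by rw [hfold]; omega⟩
    · rcases ih with h0 | ⟨s, hs, he⟩
      · right; exact ⟨r, List.mem_cons_self, by rw [hfold]; omega⟩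
      · right; exact ⟨s, List.mem_cons_of_mem _ hs, by rw [hfold]; omega⟩

theorem pvM_le_pvCC (table : List (List String)) : pvM table ≤ pvCC table := by
  induction table with
  | nil => simp [pvM, pvCC]
  | cons r t ih =>
    have hM : pvM (r :: t) = max (pvRowLast r) (pvM t) := rfl
    have hC : pvCC (r :: t) = max r.length (pvCC t) := rfl
    have := pvRowLast_le_length r
    rw [hM, hC]; omega

-- the column test A performs at a Nat index, rewritten through pvRowLast
theorem pvColEmpty_iff (table : List (List String)) (j : Nat) :
    (table.all (fun row => pvCellEmpty (PySem.List.pyGetD row (j : Int) ""))) = true ↔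
      ∀ r ∈ table, pvCellEmpty (r.getD j "") = true := by
  simp [List.all_eq_true, PySem.List.pyGetD_natCast]

-- a failed column test yields a witness row with a non-empty cell in that column
theorem pvColNonempty (table : List (List String)) (j : Nat)
    (hc : ¬ (table.all (fun row => pvCellEmpty (PySem.List.pyGetD row (j : Int) ""))) = true) :
    ∃ r ∈ table, pvCellEmpty (r.getD j "") = false := by
  by_contra hall
  push Not at hall
  exact hc ((pvColEmpty_iff table j).mpr (fun r hr => by simpa using hall r hr))

theorem pvA_loop (table : List (List String)) (n : Nat) (h : pvM table ≤ n + 1) :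
    pvTrimLoopA table (PySem.List.pyRange (n : Int) (-1) (-1)) ((n : Int) + 1) = (pvM table : Int) := by
  induction n with
  | zero =>
    rw [show ((0 : Nat) : Int) = (0 : Int) by norm_num,
        PySem.List.pyRange_neg_one_cons (by norm_num),
        PySem.List.pyRange_neg_one_eq_nil (show (0 : Int) - 1 ≤ -1 by norm_num)]
    simp only [pvTrimLoopA]
    by_cases hc : (table.all (fun row => pvCellEmpty (PySem.List.pyGetD row ((0 : Nat) : Int) ""))) = true
    · have hM0 : pvM table = 0 := by
        rcases pvM_attained table with h0 | ⟨r, hr, he⟩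
        · exact h0
        · by_contra hne
          have hk : pvRowLast r = (pvM table - 1) + 1 := by omega
          have hnonempty := pvCell_nonempty_at r (pvM table - 1) hk
          have h2 := (pvColEmpty_iff table 0).mp hc r hr
          have hm1 : pvM table - 1 = 0 := by omega
          rw [hm1] at hnonempty
          rw [hnonempty] at h2; simp at h2
      rw [if_pos (by exact_mod_cast hc), hM0]
      simp
    · have hM1 : pvM table = 1 := by
        rcases pvColNonempty table 0 (by exact_mod_cast hc) with ⟨r, hr, hne⟩
        have h1 : 1 ≤ pvRowLast r := by
          by_contra hlt
          have hle : pvRowLast r ≤ 0 := by omega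
          have := pvCell_empty_of_le r 0 hle
          rw [this] at hne; simp at hne
        have := pvM_bound table r hr
        omega
      rw [if_neg (by exact_mod_cast hc), hM1]
      norm_num
  | succ n ih =>
    rw [show ((n + 1 : Nat) : Int) = (n : Int) + 1 by push_cast; ring,
        PySem.List.pyRange_neg_one_cons (by omega)]
    simp only [pvTrimLoopA]
    by_cases hc : (table.all (fun row => pvCellEmpty (PySem.List.pyGetD row ((n + 1 : Nat) : Int) ""))) = true
    · have hcc : (table.all (fun row => pvCellEmpty (PySem.List.pyGetD row ((n : Int) + 1) ""))) = true := by
        rw [show ((n : Int) + 1) = ((n + 1 : Nat) : Int) by push_cast; ring]; exact hc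
      have hM : pvM table ≤ n + 1 := by
        by_contra hne
        rcases pvM_attained table with h0 | ⟨r, hr, he⟩
        · omega
        · have hk : pvRowLast r = (n + 1) + 1 := by omega
          have hne2 := pvCell_nonempty_at r (n + 1) hk
          have h2 := (pvColEmpty_iff table (n + 1)).mp hc r hr
          rw [hne2] at h2; simp at h2
      rw [if_pos hcc]
      rw [show (n : Int) + 1 - 1 = (n : Int) by ring]
      exact ih hM
    · have hcc : ¬ (table.all (fun row => pvCellEmpty (PySem.List.pyGetD row ((n : Int) + 1) ""))) = true := by
        rw [show ((n : Int) + 1) = ((n + 1 : Nat) : Int) by push_cast; ring]; exact hc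
      rw [if_neg hcc]
      rcases pvColNonempty table (n + 1) hc with ⟨r, hr, hne⟩
      have hge : n + 2 ≤ pvRowLast r := by
        by_contra hlt
        have hle : pvRowLast r ≤ n + 1 := by omega
        have := pvCell_empty_of_le r (n + 1) hle
        rw [this] at hne; simp at hne
      have hb := pvM_bound table r hr
      have hMeq : pvM table = n + 2 := by omega
      rw [hMeq]; push_cast; ring

-- A's max(len(row) for row in table) equals pvCC, on a nonempty table
theorem pvFoldrMaxInit (s : List (List String)) (a : Nat) :
    s.foldr (fun r m => max r.length m) a = max a (s.foldr (fun r m => max r.length m) 0) := by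
  induction s generalizing a with
  | nil => simp
  | cons r s ih =>
    simp only [List.foldr_cons]
    rw [ih a, ih 0]
    omega

theorem pvCC_fold (t : List (List String)) (a : Nat) :
    (t.map (fun row => (row.length : Int))).foldl max ((a : Nat) : Int)
      = ((t.foldr (fun r m => max r.length m) a : Nat) : Int) := by
  induction t generalizing a with
  | nil => simp
  | cons r s ih =>
    simp only [List.map_cons, List.foldl_cons, List.foldr_cons]
    rw [show max ((a : Nat) : Int) ((r.length : Nat) : Int) = (((max a r.length : Nat) : Nat) : Int) by push_cast; omega,
        ih (max a r.length)]
    congr 1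
    rw [pvFoldrMaxInit s (max a r.length), pvFoldrMaxInit s a]
    omega

theorem pvCC_A (r : List String) (t : List (List String)) :
    (PySem.List.max? ((r :: t).map (fun row => (row.length : Int))) (fun x => x)).getD 0
      = (pvCC (r :: t) : Int) := by
  simp only [List.map_cons, PySem.List.max?_id_cons, Option.getD_some]
  rw [pvCC_fold t r.length]
  congr 1
  rw [pvFoldrMaxInit t r.length]
  rfl

-- B's inner loop computes pvRowLast (shifted by the enumerate start)
theorem pvLastB_loop (row : List String) (s v : Int) :
    (PySem.List.enumerate row s).foldl
      (fun last jc => if !(pvCellEmpty jc.2) then jc.1 + 1 else last) v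
      = if pvRowLast row = 0 then v else s + (pvRowLast row : Int) := by
  induction row generalizing s v with
  | nil => simp [PySem.List.enumerate_nil, pvRowLast]
  | cons c t ih =>
    rw [PySem.List.enumerate_cons]
    simp only [List.foldl_cons]
    rw [ih]
    by_cases h0 : pvRowLast t = 0
    · rw [if_pos h0]
      by_cases hc : pvCellEmpty c
      · have h : pvRowLast (c :: t) = 0 := by simp [pvRowLast, h0, hc]
        rw [h]; simp [hc]
      · have h : pvRowLast (c :: t) = 1 := by simp [pvRowLast, h0, hc]
        rw [h]; simp [hc]
    · rw [if_neg h0]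
      have h1 : pvRowLast (c :: t) = pvRowLast t + 1 := by simp [pvRowLast, h0]
      rw [h1, if_neg (by omega)]
      push_cast; ring

theorem pvLastB_eq (row : List String) : pvLastB row = (pvRowLast row : Int) := by
  rw [pvLastB, pvLastB_loop]
  split_ifs with h <;> simp [h]

-- B's outer fold computes (pvCC, pvM)
theorem pvB_fold (table : List (List String)) (a b : Nat) :
    table.foldl
      (fun (st : Int × Int) row =>
        (if (row.length : Int) > st.1 then (row.length : Int) else st.1,
         if pvLastB row > st.2 then pvLastB row else st.2))
      ((a : Int), (b : Int))
      = (((max a (pvCC table) : Nat) : Int), ((max b (pvM table) : Nat) : Int)) := by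
  induction table generalizing a b with
  | nil => simp [pvCC, pvM]
  | cons r t ih =>
    have hC : pvCC (r :: t) = max r.length (pvCC t) := rfl
    have hM : pvM (r :: t) = max (pvRowLast r) (pvM t) := rfl
    rw [List.foldl_cons]
    have hstep : ((if (r.length : Int) > (((a : Int), (b : Int)) : Int × Int).1 then (r.length : Int) else (((a : Int), (b : Int)) : Int × Int).1,
        if pvLastB r > (((a : Int), (b : Int)) : Int × Int).2 then pvLastB r else (((a : Int), (b : Int)) : Int × Int).2) : Int × Int)
        = (((max a r.length : Nat) : Int), ((max b (pvRowLast r) : Nat) : Int)) := by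
      simp only [pvLastB_eq, Prod.mk.injEq]
      constructor <;> (split_ifs <;> omega)
    rw [hstep, ih, hC, hM]
    simp only [Prod.mk.injEq, Nat.cast_inj]
    constructor <;> omega

-- ===== VERDICT (by name: the statement is the Claim_ definition above) =====
theorem trim_trailing_empty_columns_spec : Claim_equal_trim_trailing_empty_columns := by
  intro table _
  show trim_trailing_empty_columns table = trim_trailing_empty_columns_alt table
  unfold trim_trailing_empty_columns trim_trailing_empty_columns_alt
  by_cases hg : table = [] ∨ table.head? = some []
  · rw [if_pos hg, if_pos hg]
  · rw [if_neg hg, if_neg hg]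
    push Not at hg
    obtain ⟨hne, hhd⟩ := hg
    obtain ⟨r, t, rfl⟩ := List.exists_cons_of_ne_nil hne
    have hr : r ≠ [] := by intro h; exact hhd (by simp [h])
    have hcc1 : 1 ≤ pvCC (r :: t) := by
      have : 1 ≤ r.length := List.length_pos_of_ne_nil hr
      simp only [pvCC, List.foldr_cons]; omega
    simp only [pvCC_A]
    have hMle := pvM_le_pvCC (r :: t)
    have hloop : pvTrimLoopA (r :: t)
        (PySem.List.pyRange ((pvCC (r :: t) : Int) - 1) (-1) (-1)) ((pvCC (r :: t) : Int))
        = (pvM (r :: t) : Int) := by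
      have hc : ((pvCC (r :: t) : Int) - 1) = ((pvCC (r :: t) - 1 : Nat) : Int) := by omega
      have hc2 : ((pvCC (r :: t) : Int)) = (((pvCC (r :: t) - 1 : Nat) : Int) + 1) := by omega
      rw [hc, hc2]
      exact pvA_loop (r :: t) (pvCC (r :: t) - 1) (by omega)
    rw [hloop]
    have hB := pvB_fold (r :: t) 0 0
    simp only [Nat.cast_zero, Nat.zero_max] at hB
    rw [hB]
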